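-- pv_equiv track=rewrite | github.com/PIYUSH1525/LEETCODE | 1628-count-submatrices-with-all-ones/count-submatrices-with-all-ones.py | countSubarraysOfOnes
-- ===== SOURCE A (Python) =====
-- def countSubarraysOfOnes(row_mask: list[int]) -> int:
--     consecutive_ones = 0
--     subarray_count = 0
--     for val in row_mask:
--         if val == 0:
--             consecutive_ones = 0
--         else:
--             consecutive_ones += 1
--         subarray_count += consecutive_ones
--     return subarray_count
-- ===== SOURCE B (Python) =====
-- def countSubarraysOfOnes(row_mask: list[int]) -> int:
--     # Per-run closed form: a maximal run of L nonzero values contributes L*(L+1)//2.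
--     total = 0
--     run = 0
--     for v in row_mask:
--         if v != 0:
--             run += 1
--         else:
--             total += run * (run + 1) // 2
--             run = 0
--     return total + run * (run + 1) // 2
-- ===== Notes on version B (the rewrite author's own statement) =====
-- stated objective: alternative
-- what changed: Replaces the per-element running-count accumulation with grouping into maximal nonzero runs and adding the triangular-number closed form L*(L+1)//2 once per run.
import Mathlib
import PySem

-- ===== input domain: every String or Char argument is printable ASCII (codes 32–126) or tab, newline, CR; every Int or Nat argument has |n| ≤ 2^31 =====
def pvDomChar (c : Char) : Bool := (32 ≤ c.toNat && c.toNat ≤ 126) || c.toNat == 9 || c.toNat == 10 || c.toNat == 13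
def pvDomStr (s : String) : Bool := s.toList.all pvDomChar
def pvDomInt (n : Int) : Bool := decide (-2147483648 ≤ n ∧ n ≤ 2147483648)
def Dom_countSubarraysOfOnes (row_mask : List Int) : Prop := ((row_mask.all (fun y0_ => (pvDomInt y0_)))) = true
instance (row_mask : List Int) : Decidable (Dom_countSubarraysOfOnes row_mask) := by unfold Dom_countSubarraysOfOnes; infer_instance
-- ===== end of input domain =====

-- B replaces A's per-element running-count accumulation by per-maximal-run triangular closed forms (alternative decomposition, same cost).

-- ===== PORT A =====
def countSubarraysOfOnes (row_mask : List Int) : Int :=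
  (row_mask.foldl
    (fun (st : Int × Int) val =>
      let consecutive_ones := if val = 0 then 0 else st.1 + 1
      (consecutive_ones, st.2 + consecutive_ones))
    (0, 0)).2

-- ===== PORT B =====
def countSubarraysOfOnes_alt (row_mask : List Int) : Int :=
  let st := row_mask.foldl
    (fun (st : Int × Int) v =>
      if v ≠ 0 then (st.1, st.2 + 1)
      else (st.1 + PySem.Int.floordiv (st.2 * (st.2 + 1)) 2, 0))
    (0, 0)
  st.1 + PySem.Int.floordiv (st.2 * (st.2 + 1)) 2

-- ===== PRECONDITION & SPEC =====
def Spec_countSubarraysOfOnes (row_mask : List Int) (out : Int) : Prop := out = countSubarraysOfOnes_alt row_mask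
instance (row_mask : List Int) (out : Int) : Decidable (Spec_countSubarraysOfOnes row_mask out) := by unfold Spec_countSubarraysOfOnes; infer_instance

-- ===== CLAIM (what is proved, stated in full; the proofs are below) =====
def Claim_equal_countSubarraysOfOnes : Prop := ∀ (row_mask : List Int), Dom_countSubarraysOfOnes row_mask → Spec_countSubarraysOfOnes row_mask (countSubarraysOfOnes row_mask)

-- ===== LEMMAS AND PROOFS =====

-- named copies of the two loop bodies (definitionally equal to the lambdas in the ports)
def pvStepA (st : Int × Int) (val : Int) : Int × Int :=
  (if val = 0 then 0 else st.1 + 1, st.2 + (if val = 0 then 0 else st.1 + 1))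

def pvStepB (st : Int × Int) (v : Int) : Int × Int :=
  if v ≠ 0 then (st.1, st.2 + 1)
  else (st.1 + PySem.Int.floordiv (st.2 * (st.2 + 1)) 2, 0)

def pvTri (c : Int) : Int := PySem.Int.floordiv (c * (c + 1)) 2

def pvFinB (st : Int × Int) : Int := st.1 + pvTri st.2

theorem pvTri_zero : pvTri 0 = 0 := by decide

theorem pvTri_succ (c : Int) : pvTri (c + 1) = pvTri c + (c + 1) := by
  unfold pvTri
  rw [PySem.Int.floordiv_eq_ediv_of_pos (by norm_num),
      PySem.Int.floordiv_eq_ediv_of_pos (by norm_num),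
      show (c + 1) * (c + 1 + 1) = c * (c + 1) + (c + 1) * 2 by ring,
      Int.add_mul_ediv_right _ _ (by norm_num)]

theorem pvA_eq (row_mask : List Int) :
    countSubarraysOfOnes row_mask = (row_mask.foldl pvStepA (0, 0)).2 := rfl

theorem pvB_eq (row_mask : List Int) :
    countSubarraysOfOnes_alt row_mask = pvFinB (row_mask.foldl pvStepB (0, 0)) := rfl

-- loop invariant relating the two folds, generalizing both states
theorem pv_fold_rel (xs : List Int) :
    ∀ (c s t : Int),
    (xs.foldl pvStepA (c, s)).2 + t + pvTri c = s + pvFinB (xs.foldl pvStepB (t, c)) := by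
  induction xs with
  | nil => intro c s t; simp [pvFinB]; ring
  | cons x xs ih =>
    intro c s t
    by_cases hx : x = 0
    · have hA : pvStepA (c, s) x = (0, s + 0) := by simp [pvStepA, hx]
      have hB : pvStepB (t, c) x = (t + pvTri c, 0) := by simp [pvStepB, hx, pvTri]
      rw [List.foldl_cons, List.foldl_cons, hA, hB]
      have := ih 0 (s + 0) (t + pvTri c)
      rw [pvTri_zero] at this
      linarith [this]
    · have hA : pvStepA (c, s) x = (c + 1, s + (c + 1)) := by simp [pvStepA, hx]
      have hB : pvStepB (t, c) x = (t, c + 1) := by simp [pvStepB, hx]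
      rw [List.foldl_cons, List.foldl_cons, hA, hB]
      have := ih (c + 1) (s + (c + 1)) t
      rw [pvTri_succ c] at this
      linarith [this]

-- ===== VERDICT (by name: the statement is the Claim_ definition above) =====
theorem countSubarraysOfOnes_spec : Claim_equal_countSubarraysOfOnes := by
  intro row_mask _
  unfold Spec_countSubarraysOfOnes
  rw [pvA_eq, pvB_eq]
  have := pv_fold_rel row_mask 0 0 0
  rw [pvTri_zero] at this
  linarith [this]
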